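-- pv_equiv track=rewrite | github.com/rmtew/amiga-reversing | scripts/build_runtime_kb.py | _iter_mnemonic_tokens
-- ===== SOURCE A (Python) =====
-- def _iter_mnemonic_tokens(text: str):
--     start = None
--     for i, ch in enumerate(text):
--         if ch.isspace() or ch == ",":
--             if start is not None:
--                 yield text[start:i]
--                 start = None
--             continue
--         if start is None:
--             start = i
--     if start is not None:
--         yield text[start:]
-- ===== SOURCE B (Python) =====
-- def _iter_mnemonic_tokens(text: str):
--     yield from text.replace(",", " ").split()
-- ===== Notes on version B (the rewrite author's own statement) =====
-- stated objective: idiomatic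
-- what changed: Replaces the explicit index/start-tracking character scan with a transform-then-builtin decomposition: map every comma to a space and delegate tokenisation to str.split(), which uses the same whitespace definition as str.isspace(); the per-character Python loop disappears into C-level builtins.
import Mathlib
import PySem

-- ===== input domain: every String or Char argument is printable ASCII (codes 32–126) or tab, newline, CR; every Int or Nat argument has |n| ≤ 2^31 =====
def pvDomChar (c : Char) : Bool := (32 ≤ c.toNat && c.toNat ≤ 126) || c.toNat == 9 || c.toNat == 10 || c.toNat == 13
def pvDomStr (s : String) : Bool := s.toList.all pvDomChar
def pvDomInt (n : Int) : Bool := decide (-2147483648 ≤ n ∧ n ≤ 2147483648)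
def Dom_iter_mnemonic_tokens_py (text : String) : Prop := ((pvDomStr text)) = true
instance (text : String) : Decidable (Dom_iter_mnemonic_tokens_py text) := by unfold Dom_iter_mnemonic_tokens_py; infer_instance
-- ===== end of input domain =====

-- B replaces A's explicit index/start-tracking scan by mapping commas to spaces and
-- delegating to str.split() (same whitespace rule as isspace); same cost, more idiomatic.

-- ===== PORT A =====
-- the loop state: (start, tokens yielded so far)
def iter_mnemonic_tokens_py (text : String) : List String :=
  let step : (Option Int × List String) → (Int × Char) → (Option Int × List String) :=
    fun s p =>
      if PySem.Chars.isspace p.2 || p.2 == ',' then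
        match s.1 with
        | some st => (none, s.2 ++ [PySem.Str.slice text (some st) (some p.1)])
        | none => s
      else
        match s.1 with
        | some _ => s
        | none => (some p.1, s.2)
  let r := (PySem.List.enumerate text.toList 0).foldl step (none, [])
  match r.1 with
  | some st => r.2 ++ [PySem.Str.slice text (some st) none]
  | none => r.2

-- ===== PORT B =====
def iter_mnemonic_tokens_py_alt (text : String) : List String :=
  PySem.Str.split₀ (PySem.Str.replace text "," " ")

-- ===== PRECONDITION & SPEC =====
def Spec_iter_mnemonic_tokens_py (text : String) (out : List String) : Prop := out = iter_mnemonic_tokens_py_alt text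
instance (text : String) (out : List String) : Decidable (Spec_iter_mnemonic_tokens_py text out) := by unfold Spec_iter_mnemonic_tokens_py; infer_instance

-- ===== CLAIM (what is proved, stated in full; the proofs are below) =====
def Claim_equal_iter_mnemonic_tokens_py : Prop := ∀ (text : String), Dom_iter_mnemonic_tokens_py text → Spec_iter_mnemonic_tokens_py text (iter_mnemonic_tokens_py text)

-- ===== LEMMAS AND PROOFS =====

-- comma→space map and the separator predicate
def pvF (c : Char) : Char := if c = ',' then ' ' else c
def pvW (c : Char) : Bool := PySem.Chars.isspace c || c == ','

-- replace.go with old = "," new = " " is just List.map pvF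
theorem replace_go_comma (l : List Char) (acc : List Char) :
    PySem.Chars.replace.go [','] [' '] l.length l acc = acc.reverse ++ l.map pvF := by
  induction l generalizing acc with
  | nil => simp [PySem.Chars.replace.go]
  | cons c t ih =>
    by_cases hc : c = ','
    · subst hc
      simp [PySem.Chars.replace.go, List.isPrefixOf, ih, pvF]
    · have : [','].isPrefixOf (c :: t) = false := by
        simp [List.isPrefixOf]; exact fun h => hc h.symm
      simp [PySem.Chars.replace.go, this, ih, pvF, hc]

theorem replace_comma (cs : List Char) :
    PySem.Chars.replace cs [','] [' '] = cs.map pvF := by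
  simp [PySem.Chars.replace, replace_go_comma]

theorem isspace_pvF (c : Char) : PySem.Chars.isspace (pvF c) = pvW c := by
  by_cases hc : c = ','
  · subst hc; simp only [pvF, if_pos rfl]; decide
  · simp [pvF, pvW, hc]

-- split₀.go on the separator predicate pvW, over the ORIGINAL characters
def pvGo : List Char → List Char → List (List Char) → List (List Char)
  | [], cur, acc => if cur.isEmpty then acc.reverse else (cur.reverse :: acc).reverse
  | c :: rest, cur, acc =>
    if pvW c then (if cur.isEmpty then pvGo rest [] acc else pvGo rest [] (cur.reverse :: acc))
    else pvGo rest (c :: cur) acc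

theorem split_go_map (cs : List Char) (cur : List Char) (acc : List (List Char)) :
    PySem.Chars.split₀.go (cs.map pvF) cur acc = pvGo cs cur acc := by
  induction cs generalizing cur acc with
  | nil => simp [PySem.Chars.split₀.go, pvGo]
  | cons c rest ih =>
    by_cases hw : pvW c = true
    · simp [PySem.Chars.split₀.go, pvGo, isspace_pvF, hw, ih]
    · have hc : c ≠ ',' := by
        intro h; subst h; exact hw (by decide)
      have hfc : pvF c = c := by simp [pvF, hc]
      simp [PySem.Chars.split₀.go, pvGo, isspace_pvF, hw, hfc, ih]
      intro hsp
      exact absurd (show pvW c = true by simp [pvW, hsp]) hw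

theorem pvGo_acc (cs : List Char) (cur : List Char) (acc : List (List Char)) :
    pvGo cs cur acc = acc.reverse ++ pvGo cs cur [] := by
  induction cs generalizing cur acc with
  | nil =>
    by_cases hcur : cur.isEmpty = true <;> simp [pvGo, hcur]
  | cons c rest ih =>
    by_cases hw : pvW c = true
    · by_cases hcur : cur.isEmpty = true
      · simp only [pvGo, hw, hcur, if_true]
        exact ih [] acc
      · simp only [pvGo, hw, hcur, if_true, if_false, Bool.false_eq_true]
        rw [ih [] (cur.reverse :: acc), ih [] [cur.reverse]]
        simp
    · simp only [pvGo, hw, Bool.false_eq_true, if_false]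
      exact ih (c :: cur) acc

-- abbreviations used in the invariant
def pvStep (text : String) : (Option Int × List String) → (Int × Char) → (Option Int × List String) :=
  fun s p =>
    if PySem.Chars.isspace p.2 || p.2 == ',' then
      match s.1 with
      | some st => (none, s.2 ++ [PySem.Str.slice text (some st) (some p.1)])
      | none => s
    else
      match s.1 with
      | some _ => s
      | none => (some p.1, s.2)

def pvFin (text : String) : (Option Int × List String) → List String :=
  fun r =>
    match r.1 with
    | some st => r.2 ++ [PySem.Str.slice text (some st) none]
    | none => r.2

theorem pvStep_none (text : String) (out : List String) (i : Int) (c : Char) :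
    pvStep text (none, out) (i, c) = if pvW c then (none, out) else (some i, out) := by
  simp only [pvStep, pvW]
  split <;> rfl

theorem pvStep_some (text : String) (st : Int) (out : List String) (i : Int) (c : Char) :
    pvStep text (some st, out) (i, c) =
      if pvW c then (none, out ++ [PySem.Str.slice text (some st) (some i)])
      else (some st, out) := by
  simp only [pvStep, pvW]
  split <;> rfl

-- the main loop invariant, covering both loop states
theorem pv_inv (text : String) (l : List Char) :
    ∀ (k : Nat), k ≤ text.toList.length → text.toList.drop k = l →
      (∀ out : List String,
        pvFin text ((PySem.List.enumerate l (k : Int)).foldl (pvStep text) (none, out)) =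
          out ++ (pvGo l [] []).map String.ofList) ∧
      (∀ (s : Nat) (out : List String), s < k →
        pvFin text ((PySem.List.enumerate l (k : Int)).foldl (pvStep text) (some (s : Int), out)) =
          out ++ (pvGo l (((text.toList.drop s).take (k - s)).reverse) []).map String.ofList) := by
  induction l with
  | nil =>
    intro k hk hdrop
    have hkn : k = text.toList.length := by
      have := List.drop_eq_nil_iff.mp hdrop
      omega
    constructor
    · intro out
      simp [PySem.List.enumerate, pvFin, pvGo]
    · intro s out hs
      have htake : (text.toList.drop s).take (k - s) = text.toList.drop s := by
        apply List.take_of_length_le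
        simp [hkn]
      have hne : text.toList.drop s ≠ [] := by
        simp only [ne_eq, List.drop_eq_nil_iff]
        omega
      have hempty : (text.toList.drop s).reverse.isEmpty = false := by
        simp [List.isEmpty_iff, hne]
      have hslice : PySem.Str.slice text (some (s : Int)) none
          = String.ofList (text.toList.drop s) := by
        simp [PySem.Str.slice, PySem.List.slice_from_natCast]
      simp [PySem.List.enumerate, pvFin, htake, hslice, pvGo, hempty]
  | cons c rest ih =>
    intro k hk hdrop
    have hklt : k < text.toList.length := by
      have hlen := congrArg List.length hdrop
      simp only [List.length_drop, List.length_cons] at hlen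
      omega
    have hck : text.toList.drop k = c :: rest := hdrop
    have hgetk : text.toList[k]? = some c := by
      have h0 : (text.toList.drop k)[0]? = some c := by rw [hck]; rfl
      rw [List.getElem?_drop] at h0
      simpa using h0
    have hrest : text.toList.drop (k + 1) = rest := by
      have h1 : text.toList.drop (k+1) = (text.toList.drop k).drop 1 := by
        rw [List.drop_drop]
      simp [h1, hck]
    have ihr := ih (k+1) (by omega) hrest
    have hcast : (k : Int) + 1 = ((k + 1 : Nat) : Int) := by push_cast; ring
    constructor
    · intro out
      rw [PySem.List.enumerate_cons, List.foldl_cons, pvStep_none, hcast]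
      by_cases hw : pvW c = true
      · rw [if_pos hw, (ihr.1 out)]
        simp [pvGo, hw]
      · rw [if_neg (by simp [hw]), (ihr.2 k out (by omega))]
        have h1 : ((text.toList.drop k).take (k + 1 - k)).reverse = [c] := by
          have : k + 1 - k = 1 := by omega
          simp [this, hck]
        rw [h1]
        simp [pvGo, hw]
    · intro s out hs
      rw [PySem.List.enumerate_cons, List.foldl_cons, pvStep_some, hcast]
      have hcur_ne : (text.toList.drop s).take (k - s) ≠ [] := by
        simp only [ne_eq, List.take_eq_nil_iff]
        push_neg
        constructor
        · omega
        · simp only [← List.length_eq_zero_iff.not, List.length_drop]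
          omega
      have hcur_empty : ((text.toList.drop s).take (k - s)).reverse.isEmpty = false := by
        simp [List.isEmpty_iff, hcur_ne]
      by_cases hw : pvW c = true
      · rw [if_pos hw, (ihr.1 _)]
        have hslice : PySem.Str.slice text (some (s : Int)) (some (k : Int))
            = String.ofList ((text.toList.drop s).take (k - s)) := by
          simp [PySem.Str.slice, PySem.List.slice_natCast]
        rw [hslice]
        simp only [pvGo, hw, hcur_empty, if_true, if_false, Bool.false_eq_true]
        rw [pvGo_acc rest []
          [((text.toList.drop s).take (k - s)).reverse.reverse]]
        simp
      · rw [if_neg (by simp [hw]), (ihr.2 s out (by omega))]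
        have hidx : (text.toList.drop s)[k - s]? = some c := by
          rw [List.getElem?_drop]
          have h2 : s + (k - s) = k := by omega
          rw [h2, hgetk]
        have h3 : (text.toList.drop s).take (k + 1 - s) =
            (text.toList.drop s).take (k - s) ++ [c] := by
          have hks : k + 1 - s = (k - s) + 1 := by omega
          rw [hks, List.take_succ, hidx]
          simp
        rw [h3]
        simp [pvGo, hw]

-- ===== VERDICT (by name: the statement is the Claim_ definition above) =====
theorem iter_mnemonic_tokens_py_spec : Claim_equal_iter_mnemonic_tokens_py := by
  intro text _
  show iter_mnemonic_tokens_py text = iter_mnemonic_tokens_py_alt text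
  have hA : iter_mnemonic_tokens_py text =
      pvFin text ((PySem.List.enumerate text.toList (0 : Int)).foldl (pvStep text) (none, [])) := rfl
  have hinv := (pv_inv text text.toList 0 (by omega) (by simp)).1 []
  rw [hA]
  rw [show ((PySem.List.enumerate text.toList) = PySem.List.enumerate text.toList ((0:Nat):Int)) from by norm_num]
  rw [hinv]
  have hB : iter_mnemonic_tokens_py_alt text =
      (PySem.Chars.split₀ ((text.toList.map pvF))).map String.ofList := by
    simp [iter_mnemonic_tokens_py_alt, PySem.Str.split₀, PySem.Str.replace, replace_comma]
  rw [hB]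
  simp [PySem.Chars.split₀, split_go_map]
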